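-- pv_equiv track=rewrite | github.com/yonasBSD/stalwart-mail-server | resources/scripts/migrate_v016.py | build_sub_trees
-- ===== SOURCE A (Python) =====
-- def build_sub_trees(
--     settings: dict[str, str],
--     prefix: str,
--     discriminator: str,
-- ) -> dict[str, dict[str, str]]:
--
--     record_ids: list[str] = []
--     disc_suffix = "." + discriminator
--     prefix_dot = prefix + "."
--     for k in settings:
--         if k.startswith(prefix_dot) and k.endswith(disc_suffix):
--             rid = k[len(prefix_dot):-len(disc_suffix)]
--             if rid:
--                 record_ids.append(rid)
--
--     record_ids.sort(key=lambda s: (-len(s), s))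
--
--     trees: dict[str, dict[str, str]] = {rid: {} for rid in record_ids}
--     claimed: set[str] = set()
--     for rid in record_ids:
--         head = prefix_dot + rid + "."
--         for k, v in settings.items():
--             if k in claimed:
--                 continue
--             if k.startswith(head):
--                 sub = k[len(head):]
--                 trees[rid][sub] = v
--                 claimed.add(k)
--     return trees
-- ===== SOURCE B (Python) =====
-- def _rid_of(k, prefix_dot, disc_suffix):
--     if k.startswith(prefix_dot) and k.endswith(disc_suffix):
--         rid = k[len(prefix_dot):-len(disc_suffix)]
--         if rid:
--             return rid
--     return None
--
--
-- def _match(tail, rid_set):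
--     # index of the longest dot-boundary prefix of tail that is a known record id, -1 if none
--     for i in reversed([i for i, ch in enumerate(tail) if ch == "."]):
--         if tail[:i] in rid_set:
--             return i
--     return -1
--
--
-- def build_sub_trees(
--     settings: dict[str, str],
--     prefix: str,
--     discriminator: str,
-- ) -> dict[str, dict[str, str]]:
--     prefix_dot = prefix + "."
--     disc_suffix = "." + discriminator
--     record_ids = sorted(
--         (r for r in (_rid_of(k, prefix_dot, disc_suffix) for k in settings)
--          if r is not None),
--         key=lambda s: (-len(s), s))
--     rid_set = set(record_ids)
--     trees: dict[str, dict[str, str]] = {rid: {} for rid in record_ids}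
--     for k, v in settings.items():
--         if k.startswith(prefix_dot):
--             tail = k[len(prefix_dot):]
--             i = _match(tail, rid_set)
--             if i != -1:
--                 trees[tail[:i]][tail[i + 1:]] = v
--     return trees
-- ===== Notes on version B (the rewrite author's own statement) =====
-- stated objective: alternative
-- what changed: A loops over the sorted record ids and rescans all settings for each (with a 'claimed' set); B puts the record ids in a set and makes one pass over the settings, looking up each key's longest dot-boundary prefix in that set, so the per-record rescans and the claimed-set bookkeeping disappear.
import Mathlib
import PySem

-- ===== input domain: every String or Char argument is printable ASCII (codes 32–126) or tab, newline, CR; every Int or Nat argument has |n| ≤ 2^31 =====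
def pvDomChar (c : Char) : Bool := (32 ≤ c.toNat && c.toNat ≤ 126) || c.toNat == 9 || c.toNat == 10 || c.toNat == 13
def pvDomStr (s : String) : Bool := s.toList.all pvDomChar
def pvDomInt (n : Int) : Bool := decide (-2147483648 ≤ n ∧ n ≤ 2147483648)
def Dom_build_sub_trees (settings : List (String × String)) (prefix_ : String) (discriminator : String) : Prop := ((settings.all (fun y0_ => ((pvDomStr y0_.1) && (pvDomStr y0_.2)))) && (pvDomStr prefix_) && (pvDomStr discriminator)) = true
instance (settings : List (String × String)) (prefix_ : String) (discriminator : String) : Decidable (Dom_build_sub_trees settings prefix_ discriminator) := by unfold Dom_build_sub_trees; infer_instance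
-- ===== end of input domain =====

-- B replaces A's per-record rescans of the settings (with a 'claimed' set) by a single pass
-- over the settings that looks up each key's longest dot-boundary prefix in a set of record
-- ids (objective: alternative — same result, no per-record rescans).

-- ===== PORT A =====
def build_sub_trees (settings : List (String × String)) (prefix_ : String) (discriminator : String) : List (String × List (String × String)) :=
  let disc_suffix := "." ++ discriminator
  let prefix_dot := prefix_ ++ "."
  let record_ids : List String := settings.foldl (fun acc kv =>
    if PySem.Str.startswith kv.1 prefix_dot && PySem.Str.endswith kv.1 disc_suffix then
      let rid := PySem.Str.slice kv.1 (some (PySem.Str.len prefix_dot)) (some (-(PySem.Str.len disc_suffix)))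
      if rid ≠ "" then acc ++ [rid] else acc
    else acc) []
  let record_ids := PySem.List.sorted2 record_ids (fun s => -(PySem.Str.len s)) (fun s => s) false
  let trees : PySem.Dict String (PySem.Dict String String) :=
    record_ids.foldl (fun d rid => d.insert rid PySem.Dict.empty) PySem.Dict.empty
  let st := record_ids.foldl (fun st rid =>
      let head := prefix_dot ++ rid ++ "."
      settings.foldl (fun (st : PySem.Dict String (PySem.Dict String String) × PySem.Set String) kv =>
        if PySem.Set.contains st.2 kv.1 then st
        else if PySem.Str.startswith kv.1 head then
          (st.1.modify rid PySem.Dict.empty (fun d => d.insert (PySem.Str.slice kv.1 (some (PySem.Str.len head)) none) kv.2),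
           PySem.Set.add st.2 kv.1)
        else st) st)
    (trees, (PySem.Set.empty : PySem.Set String))
  st.1.items.map (fun p => (p.1, p.2.items))

-- ===== PORT B =====
-- helper _rid_of: the record id carried by a discriminator key, if any
def bstRidOf (k prefix_dot disc_suffix : String) : Option String :=
  if PySem.Str.startswith k prefix_dot && PySem.Str.endswith k disc_suffix then
    let rid := PySem.Str.slice k (some (PySem.Str.len prefix_dot)) (some (-(PySem.Str.len disc_suffix)))
    if rid ≠ "" then some rid else none
  else none

-- helper _match: index of the longest dot-boundary prefix of tail that is a known record
-- id, -1 if none ('for … in reversed([i for i, ch in enumerate(tail) if ch == "."]): if …: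
-- return i' is find?, the fall-through 'return -1' is getD; enumerate over the string's
-- characters is enumerate over tail.toList — exact)
def bstMatch (tail : String) (rid_set : PySem.Set String) : Int :=
  (((((PySem.List.enumerate tail.toList 0).filter (fun p => p.2 == '.')).map Prod.fst).reverse).find?
    (fun i => PySem.Set.contains rid_set (PySem.Str.slice tail none (some i)))).getD (-1)

def build_sub_trees_alt (settings : List (String × String)) (prefix_ : String) (discriminator : String) : List (String × List (String × String)) :=
  let prefix_dot := prefix_ ++ "."
  let disc_suffix := "." ++ discriminator
  let record_ids : List String := PySem.List.sorted2
    ((settings.map Prod.fst).filterMap (fun k => bstRidOf k prefix_dot disc_suffix))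
    (fun s => -(PySem.Str.len s)) (fun s => s) false
  let rid_set : PySem.Set String := PySem.Set.ofList record_ids
  let trees : PySem.Dict String (PySem.Dict String String) :=
    record_ids.foldl (fun d rid => d.insert rid PySem.Dict.empty) PySem.Dict.empty
  let trees := settings.foldl (fun trees kv =>
      if PySem.Str.startswith kv.1 prefix_dot then
        let tail := PySem.Str.slice kv.1 (some (PySem.Str.len prefix_dot)) none
        let i := bstMatch tail rid_set
        if i ≠ -1 then
          trees.modify (PySem.Str.slice tail none (some i)) PySem.Dict.empty
            (fun d => d.insert (PySem.Str.slice tail (some (i + 1)) none) kv.2)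
        else trees
      else trees) trees
  trees.items.map (fun p => (p.1, p.2.items))

-- ===== PRECONDITION & SPEC =====
-- Pre_ excludes association lists with duplicate keys: 'settings' is a Python dict, whose keys are
-- unique, so a duplicated key does not represent any dict input of A (the list-level ports would
-- disagree there: A's claimed-set keeps the first value of a duplicated key, B's overwrite the last).
def Pre_build_sub_trees (settings : List (String × String)) (prefix_ : String) (discriminator : String) : Prop :=
  (settings.map Prod.fst).Nodup
instance (settings : List (String × String)) (prefix_ : String) (discriminator : String) : Decidable (Pre_build_sub_trees settings prefix_ discriminator) := by unfold Pre_build_sub_trees; infer_instance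
def pvWitness_build_sub_trees : (List (String × String)) × String × String :=
  ([("srv.x.id", "1"), ("srv.x.host", "h"), ("srv.x.y.id", "2"), ("srv.x.y.port", "99")], "srv", "id")

def Spec_build_sub_trees (settings : List (String × String)) (prefix_ : String) (discriminator : String) (out : List (String × List (String × String))) : Prop := out = build_sub_trees_alt settings prefix_ discriminator
instance (settings : List (String × String)) (prefix_ : String) (discriminator : String) (out : List (String × List (String × String))) : Decidable (Spec_build_sub_trees settings prefix_ discriminator out) := by unfold Spec_build_sub_trees; infer_instance

-- ===== CLAIM (what is proved, stated in full; the proofs are below) =====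
def Claim_equal_build_sub_trees : Prop := ∀ (settings : List (String × String)) (prefix_ : String) (discriminator : String), Dom_build_sub_trees settings prefix_ discriminator → Pre_build_sub_trees settings prefix_ discriminator → Spec_build_sub_trees settings prefix_ discriminator (build_sub_trees settings prefix_ discriminator)

-- ===== LEMMAS AND PROOFS =====

-- head-match test, sub-key, and "claimed by one of P" predicate
def bstM (pd r k : String) : Bool := PySem.Str.startswith k (pd ++ r ++ ".")
def bstSub (pd r k : String) : String := PySem.Str.slice k (some (PySem.Str.len (pd ++ r ++ "."))) none
def bstCl (pd : String) (P : List String) (k : String) : Bool := P.any (fun r => bstM pd r k)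
def bstRid (pd ds k : String) : String := PySem.Str.slice k (some (PySem.Str.len pd)) (some (-(PySem.Str.len ds)))
def bstP (pd ds k : String) : Bool := (PySem.Str.startswith k pd && PySem.Str.endswith k ds) && decide (bstRid pd ds k ≠ "")

-- A's loop bodies, as named functions (definitionally equal to the port's lambdas), and an
-- intermediate one-pass form bstStepB (find? over the sorted record-id list) used by the proof
def bstStepA (pd rid : String) (st : PySem.Dict String (PySem.Dict String String) × PySem.Set String) (kv : String × String) : PySem.Dict String (PySem.Dict String String) × PySem.Set String :=
  if PySem.Set.contains st.2 kv.1 then st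
  else if bstM pd rid kv.1 then
    (st.1.modify rid PySem.Dict.empty (fun d => d.insert (bstSub pd rid kv.1) kv.2),
     PySem.Set.add st.2 kv.1)
  else st
def bstStepB (pd : String) (rids : List String) (trees : PySem.Dict String (PySem.Dict String String)) (kv : String × String) : PySem.Dict String (PySem.Dict String String) :=
  match rids.find? (fun rid => bstM pd rid kv.1) with
  | some rid => trees.modify rid PySem.Dict.empty (fun d => d.insert (bstSub pd rid kv.1) kv.2)
  | none => trees
def bstRecStep (pd ds : String) (acc : List String) (kv : String × String) : List String :=
  if PySem.Str.startswith kv.1 pd && PySem.Str.endswith kv.1 ds then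
    (if bstRid pd ds kv.1 ≠ "" then acc ++ [bstRid pd ds kv.1] else acc)
  else acc
-- B's loop body, as a named function (definitionally equal to B's port's lambda)
def bstTail (pd k : String) : String := PySem.Str.slice k (some (PySem.Str.len pd)) none
def bstStepC (pd : String) (rs : PySem.Set String) (trees : PySem.Dict String (PySem.Dict String String)) (kv : String × String) : PySem.Dict String (PySem.Dict String String) :=
  if PySem.Str.startswith kv.1 pd then
    if bstMatch (bstTail pd kv.1) rs ≠ -1 then
      trees.modify (PySem.Str.slice (bstTail pd kv.1) none (some (bstMatch (bstTail pd kv.1) rs))) PySem.Dict.empty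
        (fun d => d.insert (PySem.Str.slice (bstTail pd kv.1) (some (bstMatch (bstTail pd kv.1) rs + 1)) none) kv.2)
    else trees
  else trees

-- a tree dict whose entries are a function of the (fixed) key list
def bstMk (rids : List String) (F : String → PySem.Dict String String) : PySem.Dict String (PySem.Dict String String) :=
  ⟨rids.map fun r => (r, F r)⟩

-- one of A's passes over the settings for record id `rid`, given that P was processed before
def bstPass (pd : String) (P : List String) (rid : String) (l : List (String × String)) (d : PySem.Dict String String) : PySem.Dict String String :=
  l.foldl (fun d kv => if !bstCl pd P kv.1 && bstM pd rid kv.1 then d.insert (bstSub pd rid kv.1) kv.2 else d) d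

-- the value of entry r after A's passes for the record ids R (P processed before)
def bstGo (pd : String) (l : List (String × String)) (P R : List String) (r : String) (d : PySem.Dict String String) : PySem.Dict String String :=
  match R with
  | [] => d
  | rid :: R' => bstGo pd l (P ++ [rid]) R' r (if r = rid then bstPass pd P rid l d else d)

theorem bst_get? (rids : List String) (F : String → PySem.Dict String String) (r : String) (hr : r ∈ rids) :
    (bstMk rids F).get? r = some (F r) := by
  induction rids with
  | nil => cases hr
  | cons x rest ih =>
    simp only [bstMk, List.map_cons]
    rw [PySem.Dict.get?_mk_cons]
    by_cases hx : x = r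
    · subst hx; simp
    · have hb : (x == r) = false := by simp [hx]
      rw [hb]
      simp only [Bool.false_eq_true, if_false]
      exact ih ((List.mem_cons.mp hr).resolve_left (fun h => hx h.symm))

theorem bst_modify (rids : List String) (F : String → PySem.Dict String String) (r : String) (d0 : PySem.Dict String String) (f : PySem.Dict String String → PySem.Dict String String) (hr : r ∈ rids) :
    (bstMk rids F).modify r d0 f = bstMk rids (fun x => if x = r then f (F r) else F x) := by
  have hg : (bstMk rids F).getD r d0 = F r := by
    rw [PySem.Dict.getD_eq_get?_getD, bst_get? _ _ _ hr]; rfl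
  have hc : (bstMk rids F).contains r = true := by
    rw [PySem.Dict.contains_eq_isSome_get?, bst_get? _ _ _ hr]; rfl
  show (bstMk rids F).insert r (f ((bstMk rids F).getD r d0)) = _
  rw [hg]
  simp only [PySem.Dict.insert, hc, if_pos]
  apply PySem.Dict.ext
  simp only [bstMk, List.map_map]
  apply List.map_congr_left
  intro x _
  by_cases hx : x = r
  · subst hx; simp
  · simp [hx]

theorem bst_contains_add (s : PySem.Set String) (x k : String) :
    PySem.Set.contains (PySem.Set.add s x) k = (PySem.Set.contains s k || k == x) := by
  rw [Bool.eq_iff_iff]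
  simp [PySem.Set.mem_add, beq_iff_eq, or_comm]

theorem bst_inner_claimed (pd rid : String) (P : List String) :
    ∀ (l : List (String × String)) (st : PySem.Dict String (PySem.Dict String String) × PySem.Set String),
    (l.map Prod.fst).Nodup →
    (∀ k ∈ l.map Prod.fst, PySem.Set.contains st.2 k = bstCl pd P k) → ∀ k,
    PySem.Set.contains (l.foldl (bstStepA pd rid) st).2 k
      = (PySem.Set.contains st.2 k || ((l.map Prod.fst).contains k && !bstCl pd P k && bstM pd rid k)) := by
  intro l
  induction l with
  | nil => intro st _ _ k; simp
  | cons kv l' ih =>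
    intro st hnd hinv k
    have hk : PySem.Set.contains st.2 kv.1 = bstCl pd P kv.1 := hinv kv.1 (by simp)
    have hnd' : (l'.map Prod.fst).Nodup := (List.nodup_cons.mp (by simpa using hnd)).2
    have hkn : kv.1 ∉ l'.map Prod.fst := (List.nodup_cons.mp (by simpa using hnd)).1
    simp only [List.foldl_cons]
    by_cases h1 : PySem.Set.contains st.2 kv.1 = true
    · rw [show bstStepA pd rid st kv = st from by unfold bstStepA; rw [if_pos h1]]
      rw [ih st hnd' (fun k' hk' => hinv k' (by simp [hk'])) k]
      by_cases hkk : k = kv.1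
      · subst hkk
        have hclk : bstCl pd P kv.1 = true := hk ▸ h1
        simp [hclk]
      · have hb : (k == kv.1) = false := beq_eq_false_iff_ne.mpr hkk
        simp [hb]
    · have hclkv : bstCl pd P kv.1 = false := by rw [← hk]; simpa using h1
      by_cases h2 : bstM pd rid kv.1 = true
      · rw [show bstStepA pd rid st kv
            = (st.1.modify rid PySem.Dict.empty (fun d => d.insert (bstSub pd rid kv.1) kv.2), PySem.Set.add st.2 kv.1)
          from by unfold bstStepA; rw [if_neg h1, if_pos h2]]
        have hinv' : ∀ k' ∈ l'.map Prod.fst,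
            PySem.Set.contains (PySem.Set.add st.2 kv.1) k' = bstCl pd P k' := by
          intro k' hk'
          rw [bst_contains_add]
          have hne : (k' == kv.1) = false := by
            simp only [beq_eq_false_iff_ne, ne_eq]; rintro rfl; exact hkn hk'
          rw [hne, hinv k' (by simp [hk']), Bool.or_false]
        rw [ih _ hnd' hinv' k]
        by_cases hkk : k = kv.1
        · subst hkk
          simp [bst_contains_add, hclkv, h2]
        · have hb : (k == kv.1) = false := beq_eq_false_iff_ne.mpr hkk
          simp [bst_contains_add, hb, hkk]
      · rw [show bstStepA pd rid st kv = st from by unfold bstStepA; rw [if_neg h1, if_neg h2]]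
        rw [ih st hnd' (fun k' hk' => hinv k' (by simp [hk'])) k]
        by_cases hkk : k = kv.1
        · subst hkk
          simp [h2]
        · have hb : (k == kv.1) = false := beq_eq_false_iff_ne.mpr hkk
          simp [hb]

theorem bst_inner_trees (pd rid : String) (rids P : List String) (hr : rid ∈ rids) :
    ∀ (l : List (String × String)) (F : String → PySem.Dict String String) (C : PySem.Set String),
    (l.map Prod.fst).Nodup →
    (∀ k ∈ l.map Prod.fst, PySem.Set.contains C k = bstCl pd P k) →
    (l.foldl (bstStepA pd rid) (bstMk rids F, C)).1
      = bstMk rids (fun r => if r = rid then bstPass pd P rid l (F r) else F r) := by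
  intro l
  induction l with
  | nil =>
    intro F C _ _
    simp only [List.foldl_nil]
    have hF : (fun r => if r = rid then bstPass pd P rid [] (F r) else F r) = F := by
      funext r; simp [bstPass]
    rw [hF]
  | cons kv l' ih =>
    intro F C hnd hinv
    have hk : PySem.Set.contains C kv.1 = bstCl pd P kv.1 := hinv kv.1 (by simp)
    have hnd' : (l'.map Prod.fst).Nodup := (List.nodup_cons.mp (by simpa using hnd)).2
    have hkn : kv.1 ∉ l'.map Prod.fst := (List.nodup_cons.mp (by simpa using hnd)).1
    simp only [List.foldl_cons]
    by_cases h1 : PySem.Set.contains C kv.1 = true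
    · have hclkv : bstCl pd P kv.1 = true := hk ▸ h1
      rw [show bstStepA pd rid (bstMk rids F, C) kv = (bstMk rids F, C) from by
        unfold bstStepA; rw [if_pos h1]]
      rw [ih F C hnd' (fun k' hk' => hinv k' (by simp [hk']))]
      congr 1
      funext r
      simp [bstPass, hclkv]
    · have hclkv : bstCl pd P kv.1 = false := by rw [← hk]; simpa using h1
      by_cases h2 : bstM pd rid kv.1 = true
      · rw [show bstStepA pd rid (bstMk rids F, C) kv
            = ((bstMk rids F).modify rid PySem.Dict.empty (fun d => d.insert (bstSub pd rid kv.1) kv.2), PySem.Set.add C kv.1)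
          from by unfold bstStepA; rw [if_neg h1, if_pos h2]]
        rw [bst_modify rids F rid _ _ hr]
        have hinv' : ∀ k' ∈ l'.map Prod.fst,
            PySem.Set.contains (PySem.Set.add C kv.1) k' = bstCl pd P k' := by
          intro k' hk'
          rw [bst_contains_add]
          have hne : (k' == kv.1) = false := by
            simp only [beq_eq_false_iff_ne, ne_eq]; rintro rfl; exact hkn hk'
          rw [hne, hinv k' (by simp [hk']), Bool.or_false]
        rw [ih _ _ hnd' hinv']
        congr 1
        funext r
        by_cases hrr : r = rid
        · subst hrr
          simp [bstPass, hclkv, h2]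
        · simp [hrr]
      · rw [show bstStepA pd rid (bstMk rids F, C) kv = (bstMk rids F, C) from by
          unfold bstStepA; rw [if_neg h1, if_neg h2]]
        rw [ih F C hnd' (fun k' hk' => hinv k' (by simp [hk']))]
        congr 1
        funext r
        have hm : bstM pd rid kv.1 = false := by simpa using h2
        simp [bstPass, hm]

theorem bst_outer (pd : String) (s : List (String × String)) (rids : List String) :
    ∀ (R P : List String) (F : String → PySem.Dict String String) (C : PySem.Set String),
    R ⊆ rids → (s.map Prod.fst).Nodup →
    (∀ k ∈ s.map Prod.fst, PySem.Set.contains C k = bstCl pd P k) →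
    (R.foldl (fun st rid => s.foldl (bstStepA pd rid) st) (bstMk rids F, C)).1
      = bstMk rids (fun r => bstGo pd s P R r (F r)) := by
  intro R
  induction R with
  | nil => intro P F C _ _ _; rfl
  | cons rid R' ih =>
    intro P F C hsub hnd hinv
    have hrid : rid ∈ rids := hsub List.mem_cons_self
    have hsub' : R' ⊆ rids := fun x hx => hsub (List.mem_cons_of_mem _ hx)
    simp only [List.foldl_cons]
    have h1 : (s.foldl (bstStepA pd rid) (bstMk rids F, C)).1
        = bstMk rids (fun r => if r = rid then bstPass pd P rid s (F r) else F r) :=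
      bst_inner_trees pd rid rids P hrid s F C hnd hinv
    have h2 : ∀ k ∈ s.map Prod.fst,
        PySem.Set.contains (s.foldl (bstStepA pd rid) (bstMk rids F, C)).2 k = bstCl pd (P ++ [rid]) k := by
      intro k hkm
      rw [bst_inner_claimed pd rid P s _ hnd hinv k]
      have hkc : (s.map Prod.fst).contains k = true := by
        simpa [List.contains_iff_mem] using hkm
      rw [hinv k hkm, hkc]
      simp only [bstCl, List.any_append, List.any_cons, List.any_nil, Bool.or_false]
      cases hc : (P.any fun r => bstM pd r k) <;> simp
    have hpair : s.foldl (bstStepA pd rid) (bstMk rids F, C)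
        = (bstMk rids (fun r => if r = rid then bstPass pd P rid s (F r) else F r),
           (s.foldl (bstStepA pd rid) (bstMk rids F, C)).2) := Prod.ext h1 rfl
    rw [hpair, ih (P ++ [rid]) _ _ hsub' hnd h2]
    rfl

theorem bst_B (pd : String) (rids : List String) (s : List (String × String)) (F : String → PySem.Dict String String) :
    s.foldl (bstStepB pd rids) (bstMk rids F)
      = bstMk rids (fun r => s.foldl (fun d kv => if rids.find? (fun rid => bstM pd rid kv.1) = some r then d.insert (bstSub pd r kv.1) kv.2 else d) (F r)) := by
  induction s generalizing F with
  | nil => rfl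
  | cons kv l' ih =>
    simp only [List.foldl_cons]
    cases hf : rids.find? (fun rid => bstM pd rid kv.1) with
    | none =>
      have hstep : bstStepB pd rids (bstMk rids F) kv = bstMk rids F := by
        unfold bstStepB; rw [hf]
      rw [hstep, ih F]
      congr 1
    | some rid =>
      have hrid : rid ∈ rids := List.mem_of_find?_eq_some hf
      have hstep : bstStepB pd rids (bstMk rids F) kv
          = bstMk rids (fun x => if x = rid then (F rid).insert (bstSub pd rid kv.1) kv.2 else F x) := by
        unfold bstStepB; rw [hf]
        exact bst_modify rids F rid _ _ hrid
      rw [hstep, ih _]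
      congr 1
      funext r
      by_cases hrr : r = rid
      · subst hrr; simp
      · have hb : ¬ (some rid = some r) := by simpa using fun h => hrr h.symm
        simp [hrr, hb]

theorem bstGo_not_mem (pd : String) (l : List (String × String)) (r : String) :
    ∀ (R P : List String) (d : PySem.Dict String String), r ∉ R → bstGo pd l P R r d = d := by
  intro R
  induction R with
  | nil => intro P d _; rfl
  | cons rid R' ih =>
    intro P d hr
    simp only [bstGo]
    rw [if_neg (by rintro rfl; exact hr (List.mem_cons_self))]
    exact ih _ _ (fun h => hr (List.mem_cons_of_mem _ h))

theorem bstGo_append (pd : String) (l : List (String × String)) (r : String) :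
    ∀ (R1 R2 P : List String) (d : PySem.Dict String String), r ∉ R1 →
      bstGo pd l P (R1 ++ R2) r d = bstGo pd l (P ++ R1) R2 r d := by
  intro R1
  induction R1 with
  | nil => intro R2 P d _; simp
  | cons x R1' ih =>
    intro R2 P d hr
    simp only [List.cons_append, bstGo]
    rw [if_neg (by rintro rfl; exact hr (List.mem_cons_self))]
    rw [ih _ _ _ (fun h => hr (List.mem_cons_of_mem _ h))]
    rw [← List.append_cons]

theorem bst_find (pd : String) (P1 P2 : List String) (r : String) (hP1 : r ∉ P1) (hP2 : r ∉ P2) (k : String) :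
    ((P1 ++ r :: P2).find? (fun rid => bstM pd rid k) = some r) ↔ (!bstCl pd P1 k && bstM pd r k) = true := by
  cases hcl : bstCl pd P1 k
  · have hall : ∀ x ∈ P1, ¬ bstM pd x k = true := by
      intro x hx hm
      have : bstCl pd P1 k = true := List.any_eq_true.mpr ⟨x, hx, hm⟩
      rw [hcl] at this; exact Bool.false_ne_true this
    have h1 : P1.find? (fun rid => bstM pd rid k) = none := List.find?_eq_none.mpr hall
    rw [List.find?_append, h1, Option.none_or]
    cases hm : bstM pd r k
    · rw [List.find?_cons_of_neg (by simp [hm])]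
      constructor
      · intro h
        exact absurd (List.mem_of_find?_eq_some h) hP2
      · intro h; simp at h
    · rw [List.find?_cons_of_pos (by simp [hm])]
      simp
  · obtain ⟨x, hxmem, hx⟩ := List.any_eq_true.mp hcl
    have hsome : (P1.find? (fun rid => bstM pd rid k)).isSome = true := by
      rw [List.find?_isSome]; exact ⟨x, hxmem, by simpa using hx⟩
    obtain ⟨x0, h0⟩ := Option.isSome_iff_exists.mp hsome
    rw [List.find?_append, h0, Option.some_or]
    constructor
    · intro h
      injection h with h
      exact absurd (h ▸ List.mem_of_find?_eq_some h0) hP1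
    · intro h; simp at h

theorem bst_entry (pd : String) (s : List (String × String)) (rids : List String)
    (hnd : rids.Nodup) (r : String) (hr : r ∈ rids) :
    bstGo pd s [] rids r PySem.Dict.empty
      = s.foldl (fun d kv => if rids.find? (fun rid => bstM pd rid kv.1) = some r then d.insert (bstSub pd r kv.1) kv.2 else d) PySem.Dict.empty := by
  obtain ⟨P1, P2, rfl⟩ := List.append_of_mem hr
  obtain ⟨hn1, hn2, hdisj⟩ := List.nodup_append.mp hnd
  have hP1 : r ∉ P1 := fun hm => hdisj r hm r List.mem_cons_self rfl
  have hP2 : r ∉ P2 := (List.nodup_cons.mp hn2).1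
  have e1 : bstGo pd s [] (P1 ++ r :: P2) r PySem.Dict.empty
      = bstGo pd s P1 (r :: P2) r PySem.Dict.empty := by
    simpa using bstGo_append pd s r P1 (r :: P2) [] PySem.Dict.empty hP1
  have e2 : bstGo pd s P1 (r :: P2) r PySem.Dict.empty
      = bstGo pd s (P1 ++ [r]) P2 r (bstPass pd P1 r s PySem.Dict.empty) := by
    simp [bstGo]
  rw [e1, e2, bstGo_not_mem pd s r P2 _ _ hP2]
  unfold bstPass
  apply PySem.List.foldl_congr_mem
  intro d kv _
  by_cases hc : (!bstCl pd P1 kv.1 && bstM pd r kv.1) = true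
  · rw [if_pos hc, if_pos ((bst_find pd P1 P2 r hP1 hP2 kv.1).mpr hc)]
  · rw [if_neg hc, if_neg (fun h => hc ((bst_find pd P1 P2 r hP1 hP2 kv.1).mp h))]

theorem bst_t0 (rids : List String) (hnd : rids.Nodup) :
    rids.foldl (fun d rid => d.insert rid PySem.Dict.empty) (PySem.Dict.empty : PySem.Dict String (PySem.Dict String String))
      = bstMk rids (fun _ => PySem.Dict.empty) := by
  apply PySem.Dict.ext
  have h := PySem.Dict.items_foldl_insert_fresh rids (fun r => r) (fun _ => (PySem.Dict.empty : PySem.Dict String String)) PySem.Dict.empty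
    (by intro a _; rfl) (by simpa using hnd)
  simpa [bstMk] using h

theorem bst_master (pd : String) (s : List (String × String)) (rids : List String)
    (hk : (s.map Prod.fst).Nodup) (hnd : rids.Nodup) :
    (rids.foldl (fun st rid => s.foldl (bstStepA pd rid) st)
        (rids.foldl (fun d rid => d.insert rid PySem.Dict.empty) PySem.Dict.empty, (PySem.Set.empty : PySem.Set String))).1
      = s.foldl (bstStepB pd rids)
          (rids.foldl (fun d rid => d.insert rid PySem.Dict.empty) PySem.Dict.empty) := by
  rw [bst_t0 rids hnd]
  have hinv0 : ∀ k ∈ s.map Prod.fst, PySem.Set.contains (PySem.Set.empty : PySem.Set String) k = bstCl pd [] k := by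
    intro k _
    simp [PySem.Set.contains, PySem.Set.empty, bstCl]
  rw [bst_outer pd s rids rids [] (fun _ => PySem.Dict.empty) PySem.Set.empty (fun x hx => hx) hk hinv0]
  rw [bst_B pd rids s (fun _ => PySem.Dict.empty)]
  unfold bstMk
  exact congrArg PySem.Dict.mk (List.map_congr_left
    (fun r hrr => congrArg (fun d => (r, d)) (bst_entry pd s rids hnd r hrr)))

theorem bst_rec_eq (pd ds : String) (s : List (String × String)) :
    ∀ acc, s.foldl (bstRecStep pd ds) acc = acc ++ ((s.map Prod.fst).filter (bstP pd ds)).map (bstRid pd ds) := by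
  induction s with
  | nil => intro acc; simp
  | cons kv s' ih =>
    intro acc
    simp only [List.foldl_cons, List.map_cons, List.filter_cons]
    by_cases h1 : (PySem.Str.startswith kv.1 pd && PySem.Str.endswith kv.1 ds) = true
    · by_cases h2 : bstRid pd ds kv.1 ≠ ""
      · have hp : bstP pd ds kv.1 = true := by
          simp only [bstP]; rw [h1]; simp [h2]
        rw [show bstRecStep pd ds acc kv = acc ++ [bstRid pd ds kv.1] from by
          unfold bstRecStep; rw [if_pos h1, if_pos h2]]
        rw [ih]
        simp [hp]
      · have hp : bstP pd ds kv.1 = false := by simp [bstP, h2]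
        rw [show bstRecStep pd ds acc kv = acc from by
          unfold bstRecStep; rw [if_pos h1, if_neg h2]]
        rw [ih, hp]
        simp
    · have hp : bstP pd ds kv.1 = false := by
        simp only [bstP]
        rw [show (PySem.Str.startswith kv.1 pd && PySem.Str.endswith kv.1 ds) = false from by simpa using h1]
        simp
      rw [show bstRecStep pd ds acc kv = acc from by unfold bstRecStep; rw [if_neg h1]]
      rw [ih, hp]
      simp

theorem bst_reconstruct (pd ds k : String) (hds : ds.toList ≠ [])
    (h1 : PySem.Str.startswith k pd = true) (h2 : PySem.Str.endswith k ds = true)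
    (h3 : bstRid pd ds k ≠ "") :
    k.toList = pd.toList ++ (bstRid pd ds k).toList ++ ds.toList := by
  have hpre : pd.toList <+: k.toList := by
    rw [PySem.Str.startswith_eq] at h1; exact (PySem.Chars.startswith_iff _ _).mp h1
  have hsuf : ds.toList <:+ k.toList := by
    rw [PySem.Str.endswith_eq] at h2; exact (PySem.Chars.endswith_iff _ _).mp h2
  have ha : pd.toList.length ≤ k.toList.length := hpre.length_le
  have hb : ds.toList.length ≤ k.toList.length := hsuf.length_le
  have hbpos : 0 < ds.toList.length := List.length_pos_iff.mpr hds
  have hR : (bstRid pd ds k).toList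
      = (k.toList.drop pd.toList.length).take (k.toList.length - ds.toList.length - pd.toList.length) := by
    unfold bstRid
    rw [PySem.Str.toList_slice]
    simp only [PySem.Chars.slice_eq_listSlice]
    have hlen1 : PySem.Str.len pd = (pd.toList.length : Int) := by simp [PySem.Str.len]
    have hlen2 : PySem.Str.len ds = (ds.toList.length : Int) := by simp [PySem.Str.len]
    rw [hlen1, hlen2]
    show List.take (PySem.List.clampIdx k.toList.length (-(ds.toList.length : Int))
        - PySem.List.clampIdx k.toList.length (pd.toList.length : Int))
      (List.drop (PySem.List.clampIdx k.toList.length (pd.toList.length : Int)) k.toList) = _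
    rw [PySem.List.clampIdx_neg_natCast _ _ hbpos, PySem.List.clampIdx_natCast,
      Nat.min_eq_left ha]
  have hRne : (bstRid pd ds k).toList ≠ [] := by
    intro h
    exact h3 (String.toList_inj.mp (by simpa using h))
  have hlenR : 0 < k.toList.length - ds.toList.length - pd.toList.length := by
    by_contra hle
    apply hRne
    rw [hR, Nat.le_zero.mp (Nat.not_lt.mp hle)]
    simp
  have hA : k.toList.take pd.toList.length = pd.toList := by
    obtain ⟨t, ht⟩ := hpre
    rw [← ht, List.take_left]
  have hsplit1 : k.toList = pd.toList ++ k.toList.drop pd.toList.length := by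
    conv_lhs => rw [← List.take_append_drop pd.toList.length k.toList]
    rw [hA]
  have hBdrop : k.toList.drop (k.toList.length - ds.toList.length) = ds.toList := by
    obtain ⟨t, ht⟩ := hsuf
    have hT : k.toList.length - ds.toList.length = t.length := by
      rw [← ht]; simp
    rw [hT, ← ht, List.drop_left]
  have hdropa : k.toList.drop pd.toList.length = (bstRid pd ds k).toList ++ ds.toList := by
    rw [hR]
    conv_lhs => rw [← List.take_append_drop (k.toList.length - ds.toList.length - pd.toList.length) (k.toList.drop pd.toList.length)]
    congr 1
    rw [List.drop_drop]
    have heq : pd.toList.length + (k.toList.length - ds.toList.length - pd.toList.length)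
        = k.toList.length - ds.toList.length := by omega
    rw [heq, hBdrop]
  calc k.toList = pd.toList ++ k.toList.drop pd.toList.length := hsplit1
    _ = pd.toList ++ ((bstRid pd ds k).toList ++ ds.toList) := by rw [hdropa]
    _ = pd.toList ++ (bstRid pd ds k).toList ++ ds.toList := (List.append_assoc _ _ _).symm

theorem bst_rec_nodup (pd ds : String) (hds : ds.toList ≠ []) (s : List (String × String))
    (hk : (s.map Prod.fst).Nodup) :
    (s.foldl (bstRecStep pd ds) []).Nodup := by
  rw [bst_rec_eq, List.nil_append]
  apply List.Nodup.map_on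
  · intro x hx y hy hxy
    have hpx := List.of_mem_filter hx
    have hpy := List.of_mem_filter hy
    simp only [bstP, Bool.and_eq_true, decide_eq_true_eq] at hpx hpy
    have ex := bst_reconstruct pd ds x hds hpx.1.1 hpx.1.2 hpx.2
    have ey := bst_reconstruct pd ds y hds hpy.1.1 hpy.1.2 hpy.2
    apply String.toList_inj.mp
    rw [ex, ey, hxy]
  · exact hk.filter _

-- ========== NEW: B-side lemmas ==========

theorem bst_alt_rec_eq (pd ds : String) (s : List (String × String)) :
    (s.map Prod.fst).filterMap (fun k => bstRidOf k pd ds) = s.foldl (bstRecStep pd ds) [] := by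
  rw [bst_rec_eq, List.nil_append]
  induction s with
  | nil => rfl
  | cons kv s' ih =>
    simp only [List.map_cons, List.filterMap_cons, List.filter_cons]
    by_cases h1 : (PySem.Str.startswith kv.1 pd && PySem.Str.endswith kv.1 ds) = true
    · by_cases h2 : bstRid pd ds kv.1 ≠ ""
      · have hp : bstP pd ds kv.1 = true := by simp only [bstP]; rw [h1]; simp [h2]
        rw [show bstRidOf kv.1 pd ds = some (bstRid pd ds kv.1) from by
          unfold bstRidOf; rw [if_pos h1]; exact if_pos h2]
        simp [hp, ih]
      · have hp : bstP pd ds kv.1 = false := by simp [bstP, h2]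
        rw [show bstRidOf kv.1 pd ds = none from by
          unfold bstRidOf; rw [if_pos h1]; exact if_neg h2]
        simp [hp, ih]
    · have hp : bstP pd ds kv.1 = false := by
        simp only [bstP]
        rw [show (PySem.Str.startswith kv.1 pd && PySem.Str.endswith kv.1 ds) = false from by simpa using h1]
        simp
      rw [show bstRidOf kv.1 pd ds = none from by unfold bstRidOf; rw [if_neg h1]]
      simp [hp, ih]

theorem bst_insertBy_pw {α : Type} (R : α → α → Prop) (before : α → α → Bool)
    (htr : ∀ a b c, R a b → R b c → R a c)
    (h1 : ∀ a b, before a b = true → R a b) (h2 : ∀ a b, before a b = false → R b a)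
    (x : α) (ys : List α) (h : List.Pairwise R ys) :
    List.Pairwise R (PySem.List.insertBy before x ys) := by
  induction ys with
  | nil => simp [PySem.List.insertBy]
  | cons y ys ih =>
    rw [PySem.List.insertBy]
    by_cases hb : before x y = true
    · rw [if_pos hb]
      have hxy : R x y := h1 _ _ hb
      constructor
      · intro z hz
        rcases List.mem_cons.mp hz with rfl | hz
        · exact hxy
        · exact htr _ _ _ hxy ((List.pairwise_cons.mp h).1 z hz)
      · exact h
    · rw [if_neg hb]
      obtain ⟨hy, hys⟩ := List.pairwise_cons.mp h
      constructor
      · intro z hz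
        rcases (PySem.List.insertBy_mem_iff _ _ _ _).mp hz with rfl | hz
        · exact h2 _ _ (by simpa using hb)
        · exact hy z hz
      · exact ih hys

theorem bst_foldl_insertBy_pw {α : Type} (R : α → α → Prop) (before : α → α → Bool)
    (htr : ∀ a b c, R a b → R b c → R a c)
    (h1 : ∀ a b, before a b = true → R a b) (h2 : ∀ a b, before a b = false → R b a)
    (xs : List α) : ∀ acc, List.Pairwise R acc →
    List.Pairwise R (xs.foldl (fun acc x => PySem.List.insertBy before x acc) acc) := by
  induction xs with
  | nil => intro acc h; exact h
  | cons x xs ih =>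
    intro acc h
    exact ih _ (bst_insertBy_pw R before htr h1 h2 x acc h)

theorem bst_sorted_len_pw (L : List String) :
    List.Pairwise (fun a b : String => b.toList.length ≤ a.toList.length)
      (PySem.List.sorted2 L (fun s => -(PySem.Str.len s)) (fun s => s) false) := by
  unfold PySem.List.sorted2
  simp only [if_neg (by decide : ¬ (false = true))]
  apply bst_foldl_insertBy_pw (R := fun a b : String => b.toList.length ≤ a.toList.length)
    (htr := fun a b c hab hbc => le_trans hbc hab)
  · intro a b hb
    simp only [Bool.or_eq_true, Bool.and_eq_true, decide_eq_true_eq, Bool.not_eq_eq_eq_not, Bool.not_true, decide_eq_false_iff_not] at hb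
    simp only [PySem.Str.len] at hb
    rcases hb with hb | ⟨hb, _⟩ <;> omega
  · intro a b hb
    simp only [Bool.or_eq_false_iff, Bool.and_eq_false_iff, decide_eq_false_iff_not, Bool.not_eq_false', decide_eq_true_eq] at hb
    have := hb.1
    simp only [PySem.Str.len] at this
    omega
  · exact List.Pairwise.nil

theorem bst_prefix_dot_iff (r l : List Char) :
    (r ++ ['.'] <+: l) ↔ (l.take r.length = r ∧ l[r.length]? = some '.') := by
  constructor
  · intro h
    obtain ⟨t, ht⟩ := h
    constructor
    · rw [← ht, List.append_assoc]
      exact List.take_left' rfl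
    · rw [← ht, List.append_assoc]
      rw [List.getElem?_append_right (le_refl _)]
      simp
  · rintro ⟨h1, h2⟩
    have hlt : r.length < l.length := (List.getElem?_eq_some_iff.mp h2).1
    refine ⟨l.drop (r.length + 1), ?_⟩
    have : l = l.take r.length ++ l.drop r.length := (List.take_append_drop _ _).symm
    rw [List.append_assoc]
    rw [h1] at this
    conv_rhs => rw [this]
    congr 1
    have hd : l.drop r.length = l[r.length] :: l.drop (r.length + 1) := (List.getElem_cons_drop hlt).symm
    rw [hd]
    have : l[r.length] = '.' := by
      have := List.getElem?_eq_some_iff.mp h2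
      obtain ⟨h, he⟩ := this
      simpa using he
    rw [this]
    rfl

theorem bst_tail_toList (pd k : String) (hst : PySem.Str.startswith k pd = true) :
    (PySem.Str.slice k (some (PySem.Str.len pd)) none).toList = k.toList.drop pd.toList.length := by
  rw [PySem.Str.startswith_eq] at hst
  have hpre : pd.toList <+: k.toList := (PySem.Chars.startswith_iff _ _).mp hst
  rw [PySem.Str.toList_slice, PySem.Chars.slice_eq_listSlice]
  show List.take (k.toList.length - PySem.List.clampIdx k.toList.length (PySem.Str.len pd))
      (List.drop (PySem.List.clampIdx k.toList.length (PySem.Str.len pd)) k.toList) = _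
  have : PySem.Str.len pd = (pd.toList.length : Int) := by simp [PySem.Str.len]
  rw [this, PySem.List.clampIdx_natCast, Nat.min_eq_left hpre.length_le]
  apply List.take_of_length_le
  simp

theorem bst_startswith_prefix (k p : String) :
    PySem.Str.startswith k p = true ↔ p.toList <+: k.toList := by
  rw [PySem.Str.startswith_eq]; exact PySem.Chars.startswith_iff _ _

theorem bst_M_iff (pd rid k : String) (hst : PySem.Str.startswith k pd = true) :
    bstM pd rid k = true ↔ (rid.toList ++ ['.'] <+: k.toList.drop pd.toList.length) := by
  have hpre : pd.toList <+: k.toList := (bst_startswith_prefix _ _).mp hst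
  obtain ⟨t, ht⟩ := hpre
  have hdrop : k.toList.drop pd.toList.length = t := by rw [← ht]; simp
  rw [bstM, bst_startswith_prefix, hdrop]
  have : (pd ++ rid ++ ".").toList = pd.toList ++ (rid.toList ++ ['.']) := by simp
  rw [this, ← ht, List.prefix_append_right_inj]

theorem bst_M_false (pd rid k : String) (hst : PySem.Str.startswith k pd = false) :
    bstM pd rid k = false := by
  by_contra h
  have hM : bstM pd rid k = true := by simpa using h
  rw [bstM, bst_startswith_prefix] at hM
  have hp : pd.toList <+: k.toList := by
    refine List.IsPrefix.trans ?_ hM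
    simp only [String.toList_append]
    exact (List.prefix_append _ _).trans (List.prefix_append _ _)
  have := (bst_startswith_prefix k pd).mpr hp
  rw [hst] at this
  exact Bool.false_ne_true this

theorem bst_mem_dts (l : List Char) (i : Int) :
    i ∈ (((PySem.List.enumerate l 0).filter (fun p => p.2 == '.')).map Prod.fst)
      ↔ ∃ n : Nat, i = (n : Int) ∧ l[n]? = some '.' := by
  simp only [List.mem_map, List.mem_filter]
  constructor
  · rintro ⟨p, ⟨hmem, hdot⟩, rfl⟩
    obtain ⟨n, hlt, rfl⟩ := (PySem.List.mem_enumerate_iff _ _ _).mp hmem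
    refine ⟨n, by simp, ?_⟩
    rw [List.getElem?_eq_getElem hlt]
    simpa using hdot
  · rintro ⟨n, rfl, hsome⟩
    obtain ⟨hlt, he⟩ := List.getElem?_eq_some_iff.mp hsome
    exact ⟨((0 : Int) + n, l[n]), ⟨(PySem.List.mem_enumerate_iff _ _ _).mpr ⟨n, hlt, rfl⟩, by simp [he]⟩, by simp⟩

theorem bst_dts_pw (l : List Char) :
    List.Pairwise (fun a b => b < a)
      ((((PySem.List.enumerate l 0).filter (fun p => p.2 == '.')).map Prod.fst).reverse) := by
  rw [List.pairwise_reverse]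
  exact ((PySem.List.pairwise_lt_enumerate l 0).filter _).map _ (fun a b h => h)

theorem bst_find_decreasing (l : List Int) (p : Int → Bool)
    (hpw : List.Pairwise (fun a b => b < a) l) (n : Int) (hn : n ∈ l) (hpn : p n = true)
    (hgt : ∀ j ∈ l, n < j → p j = false) : l.find? p = some n := by
  induction l with
  | nil => cases hn
  | cons x xs ih =>
    obtain ⟨hx, hxs⟩ := List.pairwise_cons.mp hpw
    by_cases hxn : x = n
    · subst hxn
      rw [List.find?_cons_of_pos hpn]
    · have hnxs : n ∈ xs := (List.mem_cons.mp hn).resolve_left (fun h => hxn h.symm)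
      have hnx : n < x := hx n hnxs
      have hpx : p x = false := hgt x (by simp) hnx
      rw [List.find?_cons_of_neg (by simp [hpx])]
      exact ih hxs hnxs (fun j hj hnj => hgt j (by simp [hj]) hnj)

theorem bst_take_slice (tail : String) (n : Nat) (hn : n ≤ tail.toList.length) :
    (PySem.Str.slice tail none (some (n : Int))).toList = tail.toList.take n := by
  rw [PySem.Str.toList_slice, PySem.Chars.slice_eq_listSlice]
  show List.take (PySem.List.clampIdx tail.toList.length (n : Int) - 0) (List.drop 0 tail.toList) = _
  rw [PySem.List.clampIdx_natCast, Nat.min_eq_left hn]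
  simp

theorem bst_drop_slice (tail : String) (n : Nat) (hn : n + 1 ≤ tail.toList.length) :
    (PySem.Str.slice tail (some ((n : Int) + 1)) none).toList = tail.toList.drop (n + 1) := by
  rw [PySem.Str.toList_slice, PySem.Chars.slice_eq_listSlice]
  show List.take (tail.toList.length - PySem.List.clampIdx tail.toList.length ((n : Int) + 1))
      (List.drop (PySem.List.clampIdx tail.toList.length ((n : Int) + 1)) tail.toList) = _
  have : ((n : Int) + 1) = ((n + 1 : Nat) : Int) := by push_cast; ring
  rw [this, PySem.List.clampIdx_natCast, Nat.min_eq_left hn]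
  apply List.take_of_length_le
  simp

theorem bst_contains_ofList (S : List String) (x : String) :
    PySem.Set.contains (PySem.Set.ofList S) x = true ↔ x ∈ S := by
  rw [PySem.Set.contains_iff]
  exact PySem.Set.mem_ofList S x

-- a successful set lookup at a dot position yields a head-matching record id
theorem bst_hit (pd k : String) (S : List String) (hst : PySem.Str.startswith k pd = true)
    (n' : Nat) (hdot : (k.toList.drop pd.toList.length)[n']? = some '.')
    (hpred : PySem.Set.contains (PySem.Set.ofList S) (PySem.Str.slice (bstTail pd k) none (some (n' : Int))) = true) :
    (PySem.Str.slice (bstTail pd k) none (some (n' : Int))) ∈ S ∧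
    (PySem.Str.slice (bstTail pd k) none (some (n' : Int))).toList.length = n' ∧
    bstM pd (PySem.Str.slice (bstTail pd k) none (some (n' : Int))) k = true := by
  have htl : (bstTail pd k).toList = k.toList.drop pd.toList.length := bst_tail_toList pd k hst
  have hlt : n' < (k.toList.drop pd.toList.length).length := (List.getElem?_eq_some_iff.mp hdot).1
  have hle : n' ≤ (bstTail pd k).toList.length := by rw [htl]; omega
  have hslice : (PySem.Str.slice (bstTail pd k) none (some (n' : Int))).toList
      = (k.toList.drop pd.toList.length).take n' := by
    rw [bst_take_slice _ _ hle, htl]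
  have hlen : (PySem.Str.slice (bstTail pd k) none (some (n' : Int))).toList.length = n' := by
    rw [hslice, List.length_take]; omega
  refine ⟨(bst_contains_ofList S _).mp hpred, hlen, ?_⟩
  rw [bst_M_iff pd _ k hst, bst_prefix_dot_iff]
  rw [hlen, hslice, hdot]
  exact ⟨rfl, rfl⟩

-- the crux: B's per-key step computes A's one-pass step (find? over the sorted list)
theorem bst_step_eq (pd : String) (S : List String)
    (hpw : List.Pairwise (fun a b : String => b.toList.length ≤ a.toList.length) S)
    (trees : PySem.Dict String (PySem.Dict String String)) (kv : String × String) :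
    bstStepC pd (PySem.Set.ofList S) trees kv = bstStepB pd S trees kv := by
  obtain ⟨k, v⟩ := kv
  by_cases hst : PySem.Str.startswith k pd = true
  · unfold bstStepC bstStepB
    rw [if_pos hst]
    have htl : (bstTail pd k).toList = k.toList.drop pd.toList.length := bst_tail_toList pd k hst
    cases hf : S.find? (fun rid => bstM pd rid k) with
    | some rid =>
      obtain ⟨hm, P, Q, hS, hPfail⟩ := List.find?_eq_some_iff_append.mp hf
      have hdotpre := (bst_prefix_dot_iff _ _).mp ((bst_M_iff pd rid k hst).mp hm)
      obtain ⟨htake, hdot⟩ := hdotpre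
      have hlt : rid.toList.length < (k.toList.drop pd.toList.length).length :=
        (List.getElem?_eq_some_iff.mp hdot).1
      have hfind : (((((PySem.List.enumerate (bstTail pd k).toList 0).filter (fun p => p.2 == '.')).map Prod.fst).reverse).find?
          (fun i => PySem.Set.contains (PySem.Set.ofList S) (PySem.Str.slice (bstTail pd k) none (some i))))
          = some ((rid.toList.length : Nat) : Int) := by
        rw [htl]
        apply bst_find_decreasing _ _ (bst_dts_pw _)
        · rw [List.mem_reverse, bst_mem_dts]
          exact ⟨rid.toList.length, rfl, hdot⟩
        · have hsl : PySem.Str.slice (bstTail pd k) none (some ((rid.toList.length : Nat) : Int)) = rid := by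
            apply String.toList_inj.mp
            rw [bst_take_slice _ _ (by rw [htl]; omega), htl, htake]
          show PySem.Set.contains _ (PySem.Str.slice (bstTail pd k) none _) = true
          rw [hsl, bst_contains_ofList]
          rw [hS]; exact List.mem_append_right _ (List.mem_cons_self)
        · intro j hj hnj
          rw [List.mem_reverse, bst_mem_dts] at hj
          obtain ⟨n', rfl, hdot'⟩ := hj
          by_contra hp
          have hpred : PySem.Set.contains (PySem.Set.ofList S) (PySem.Str.slice (bstTail pd k) none (some (n' : Int))) = true := by
            simpa using hp
          obtain ⟨hmem, hlen', hM'⟩ := bst_hit pd k S hst n' hdot' hpred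
          set rid' := PySem.Str.slice (bstTail pd k) none (some (n' : Int)) with hrid'
          rw [hS] at hmem
          rcases List.mem_append.mp hmem with hmem | hmem
          · have := hPfail rid' hmem
            rw [hM'] at this; simp at this
          · rcases List.mem_cons.mp hmem with rfl | hmem
            · omega
            · rw [hS] at hpw
              have hle : rid'.toList.length ≤ rid.toList.length :=
                (List.pairwise_cons.mp (List.pairwise_append.mp hpw).2.1).1 rid' hmem
              omega
      have hmatch : bstMatch (bstTail pd k) (PySem.Set.ofList S) = ((rid.toList.length : Nat) : Int) := by
        unfold bstMatch
        rw [hfind]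
        rfl
      have hsl : PySem.Str.slice (bstTail pd k) none (some ((rid.toList.length : Nat) : Int)) = rid := by
        apply String.toList_inj.mp
        rw [bst_take_slice _ _ (by rw [htl]; omega), htl, htake]
      have hsub : PySem.Str.slice (bstTail pd k) (some (((rid.toList.length : Nat) : Int) + 1)) none = bstSub pd rid k := by
        apply String.toList_inj.mp
        rw [bst_drop_slice _ _ (by rw [htl]; omega)]
        have hMst : PySem.Str.startswith k (pd ++ rid ++ ".") = true := hm
        have := bst_tail_toList (pd ++ rid ++ ".") k hMst
        show (bstTail pd k).toList.drop (rid.toList.length + 1) = (bstSub pd rid k).toList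
        rw [htl]
        show (k.toList.drop pd.toList.length).drop (rid.toList.length + 1)
            = (PySem.Str.slice k (some (PySem.Str.len (pd ++ rid ++ "."))) none).toList
        rw [this, List.drop_drop]
        have hlen3 : (pd ++ rid ++ ".").toList.length = pd.toList.length + (rid.toList.length + 1) := by
          rw [show (pd ++ rid ++ ".").toList = pd.toList ++ rid.toList ++ ['.'] from by simp]
          simp [List.length_append]
        rw [hlen3]
      rw [hmatch]
      rw [if_pos (show ((rid.toList.length : Nat) : Int) ≠ -1 by omega)]
      show trees.modify (PySem.Str.slice (bstTail pd k) none (some ((rid.toList.length : Nat) : Int))) PySem.Dict.empty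
          (fun d => d.insert (PySem.Str.slice (bstTail pd k) (some (((rid.toList.length : Nat) : Int) + 1)) none) v)
        = trees.modify rid PySem.Dict.empty (fun d => d.insert (bstSub pd rid k) v)
      rw [hsl, hsub]
    | none =>
      have hall := List.find?_eq_none.mp hf
      have hfind : (((((PySem.List.enumerate (bstTail pd k).toList 0).filter (fun p => p.2 == '.')).map Prod.fst).reverse).find?
          (fun i => PySem.Set.contains (PySem.Set.ofList S) (PySem.Str.slice (bstTail pd k) none (some i))))
          = none := by
        rw [htl]
        apply List.find?_eq_none.mpr
        intro j hj hp
        rw [List.mem_reverse, bst_mem_dts] at hj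
        obtain ⟨n', rfl, hdot'⟩ := hj
        obtain ⟨hmem, _, hM'⟩ := bst_hit pd k S hst n' hdot' (by simpa using hp)
        have := hall _ hmem
        rw [hM'] at this; simp at this
      have hmatch : bstMatch (bstTail pd k) (PySem.Set.ofList S) = -1 := by
        unfold bstMatch
        rw [hfind]
        rfl
      rw [hmatch]
      rw [if_neg (by simp)]
  · have hst' : PySem.Str.startswith k pd = false := by simpa using hst
    unfold bstStepC bstStepB
    rw [if_neg (by rw [hst']; simp)]
    have : S.find? (fun rid => bstM pd rid k) = none := by
      apply List.find?_eq_none.mpr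
      intro rid _ hM
      rw [bst_M_false pd rid k hst'] at hM
      simp at hM
    rw [this]

-- ===== VERDICT (by name: the statement is the Claim_ definition above) =====
theorem build_sub_trees_spec : Claim_equal_build_sub_trees := by
  intro settings prefix_ discriminator _hdom hpre
  unfold Spec_build_sub_trees
  have hds : ("." ++ discriminator).toList ≠ [] := by simp
  have hrec : (settings.foldl (bstRecStep (prefix_ ++ ".") ("." ++ discriminator)) []).Nodup :=
    bst_rec_nodup _ _ hds settings hpre
  have hrids : (PySem.List.sorted2 (settings.foldl (bstRecStep (prefix_ ++ ".") ("." ++ discriminator)) []) (fun s => -(PySem.Str.len s)) (fun s => s) false).Nodup :=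
    ((PySem.List.sorted2_perm _ _ _ _).nodup_iff).mpr hrec
  have hL : (settings.map Prod.fst).filterMap (fun k => bstRidOf k (prefix_ ++ ".") ("." ++ discriminator))
      = settings.foldl (bstRecStep (prefix_ ++ ".") ("." ++ discriminator)) [] :=
    bst_alt_rec_eq _ _ _
  have hA : build_sub_trees settings prefix_ discriminator
      = (settings.foldl
          (bstStepB (prefix_ ++ ".")
            (PySem.List.sorted2 (settings.foldl (bstRecStep (prefix_ ++ ".") ("." ++ discriminator)) []) (fun s => -(PySem.Str.len s)) (fun s => s) false))
          ((PySem.List.sorted2 (settings.foldl (bstRecStep (prefix_ ++ ".") ("." ++ discriminator)) []) (fun s => -(PySem.Str.len s)) (fun s => s) false).foldl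
            (fun d rid => d.insert rid PySem.Dict.empty) PySem.Dict.empty)).items.map (fun p => (p.1, p.2.items)) :=
    congrArg (fun t : PySem.Dict String (PySem.Dict String String) => t.items.map (fun p => (p.1, p.2.items)))
      (bst_master (prefix_ ++ ".") settings _ hpre hrids)
  have hstep : bstStepC (prefix_ ++ ".")
        (PySem.Set.ofList (PySem.List.sorted2 (settings.foldl (bstRecStep (prefix_ ++ ".") ("." ++ discriminator)) []) (fun s => -(PySem.Str.len s)) (fun s => s) false))
      = bstStepB (prefix_ ++ ".")
        (PySem.List.sorted2 (settings.foldl (bstRecStep (prefix_ ++ ".") ("." ++ discriminator)) []) (fun s => -(PySem.Str.len s)) (fun s => s) false) :=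
    funext fun trees => funext fun kv => bst_step_eq _ _ (bst_sorted_len_pw _) trees kv
  have hB : build_sub_trees_alt settings prefix_ discriminator
      = (settings.foldl
          (bstStepC (prefix_ ++ ".")
            (PySem.Set.ofList (PySem.List.sorted2 ((settings.map Prod.fst).filterMap (fun k => bstRidOf k (prefix_ ++ ".") ("." ++ discriminator))) (fun s => -(PySem.Str.len s)) (fun s => s) false)))
          ((PySem.List.sorted2 ((settings.map Prod.fst).filterMap (fun k => bstRidOf k (prefix_ ++ ".") ("." ++ discriminator))) (fun s => -(PySem.Str.len s)) (fun s => s) false).foldl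
            (fun d rid => d.insert rid PySem.Dict.empty) PySem.Dict.empty)).items.map (fun p => (p.1, p.2.items)) := rfl
  rw [hA, hB, hL, hstep]
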